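-- pv_equiv track=rewrite | github.com/fffroehlich/HANABI-RL | hanabiTreeRuleGuided3.py | get_rest
-- ===== SOURCE A (Python) =====
-- from itertools import product
--
-- def get_rest (player, stack, discarded, decks):
--
--     _rest = list(product(range(N_SUITS), (1, 1, 1, 2, 2, 3, 3, 4, 4, 5)))
--
--     for i, deck in enumerate(decks):
--         if i != player:
--             for card in deck:
--                 if card != (-1, -1):
--                     _rest.remove(card)
--
--     for card in stack + discarded:
--         if card != (-1, -1):
--             _rest.remove(card)
--
--     return _rest
--
-- N_SUITS = 5
-- ===== SOURCE B (Python) =====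
-- from itertools import product
--
-- N_SUITS = 5
--
-- def get_rest(player, stack, discarded, decks):
--     # one pass: count how many copies of each card are visible (skipping (-1,-1))
--     seen = [card for i, deck in enumerate(decks) if i != player
--                  for card in deck if card != (-1, -1)]
--     seen += [card for card in stack + discarded if card != (-1, -1)]
--     removal = {}
--     for card in seen:
--         removal[card] = removal.get(card, 0) + 1
--     # one pass over the fixed universe, dropping counted cards in place
--     rest = []
--     for card in product(range(N_SUITS), (1, 1, 1, 2, 2, 3, 3, 4, 4, 5)):
--         if removal.get(card, 0) > 0:
--             removal[card] = removal[card] - 1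
--         else:
--             rest.append(card)
--     if any(removal[card] > 0 for card in removal):
--         raise ValueError('card not in rest')
--     return rest
-- ===== Notes on version B (the rewrite author's own statement) =====
-- stated objective: alternative
-- what changed: Replaces A's repeated list.remove scans of the shrinking 50-card list by one counting pass over the seen cards (a dict of removal counts) followed by a single order-preserving filter pass over the fixed universe, raising ValueError exactly when a count is left over.
import Mathlib
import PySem

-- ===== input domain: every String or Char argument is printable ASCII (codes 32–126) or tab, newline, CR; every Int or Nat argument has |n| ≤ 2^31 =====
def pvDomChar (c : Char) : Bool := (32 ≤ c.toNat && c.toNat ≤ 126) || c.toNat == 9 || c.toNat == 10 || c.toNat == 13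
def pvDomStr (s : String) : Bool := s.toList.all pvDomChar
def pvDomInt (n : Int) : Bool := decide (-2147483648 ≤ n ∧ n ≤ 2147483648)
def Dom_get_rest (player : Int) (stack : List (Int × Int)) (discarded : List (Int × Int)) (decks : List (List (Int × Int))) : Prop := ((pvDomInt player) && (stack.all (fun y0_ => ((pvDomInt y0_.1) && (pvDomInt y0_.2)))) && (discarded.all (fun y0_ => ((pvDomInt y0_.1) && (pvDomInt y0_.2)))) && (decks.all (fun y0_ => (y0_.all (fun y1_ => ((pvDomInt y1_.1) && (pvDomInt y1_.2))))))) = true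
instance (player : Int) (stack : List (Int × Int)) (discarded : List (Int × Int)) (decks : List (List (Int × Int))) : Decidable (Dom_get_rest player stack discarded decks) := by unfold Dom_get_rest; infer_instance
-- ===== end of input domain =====

-- B replaces A's repeated list.remove scans by one counting pass and one filtering
-- pass over the fixed 50-card universe (objective: alternative/simpler data structure).

-- list(product(range(N_SUITS), (1, 1, 1, 2, 2, 3, 3, 4, 4, 5))), N_SUITS = 5
def pvUniverse : List (Int × Int) :=
  (PySem.List.pyRange 0 5 1).flatMap
    (fun s => ([1, 1, 1, 2, 2, 3, 3, 4, 4, 5] : List Int).map (fun r => (s, r)))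

-- ===== PORT A =====
def get_rest (player : Int) (stack : List (Int × Int)) (discarded : List (Int × Int)) (decks : List (List (Int × Int))) : List (Int × Int) :=
  -- _rest carried as an Option: none = a .remove raised ValueError (excluded by Pre_)
  let st1 : Option (List (Int × Int)) :=
    (PySem.List.enumerate decks).foldl
      (fun acc p =>
        if p.1 ≠ player then
          p.2.foldl
            (fun acc card =>
              if card ≠ (-1, -1) then acc.bind (fun r => PySem.List.remove? r card) else acc)
            acc
        else acc)
      (some pvUniverse)
  let st2 : Option (List (Int × Int)) :=
    (stack ++ discarded).foldl
      (fun acc card =>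
        if card ≠ (-1, -1) then acc.bind (fun r => PySem.List.remove? r card) else acc)
      st1
  st2.getD []

-- ===== PORT B =====
-- the two comprehensions building `seen`
def pvSeen (player : Int) (stack : List (Int × Int)) (discarded : List (Int × Int)) (decks : List (List (Int × Int))) : List (Int × Int) :=
  ((PySem.List.enumerate decks).filter (fun p => p.1 ≠ player)).flatMap
      (fun p => p.2.filter (fun card => card ≠ (-1, -1)))
    ++ (stack ++ discarded).filter (fun card => card ≠ (-1, -1))

-- loop body of B's single filtering pass: state = (removal dict, rest accumulator)
def pvStep (p : PySem.Dict (Int × Int) Int × List (Int × Int)) (card : Int × Int) :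
    PySem.Dict (Int × Int) Int × List (Int × Int) :=
  if p.1.getD card 0 > 0 then (p.1.insert card (p.1.getD card 0 - 1), p.2)
  else (p.1, p.2 ++ [card])

def get_rest_alt (player : Int) (stack : List (Int × Int)) (discarded : List (Int × Int)) (decks : List (List (Int × Int))) : List (Int × Int) :=
  let seen := pvSeen player stack discarded decks
  let removal : PySem.Dict (Int × Int) Int :=
    seen.foldl (fun d card => d.insert card (d.getD card 0 + 1)) PySem.Dict.empty
  let fin := pvUniverse.foldl pvStep (removal, ([] : List (Int × Int)))
  -- `if any(removal[card] > 0 for card in removal): raise ValueError` — raising excluded by Pre_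
  if fin.1.keys.any (fun k => fin.1.getD k 0 > 0) then [] else fin.2

-- ===== PRECONDITION & SPEC =====
-- Pre_ admits exactly the inputs where A returns: every seen card (outside the
-- player's deck, not (-1,-1)) occurs in `seen` at most as often as in the 50-card
-- universe; otherwise some _rest.remove raises ValueError (and B raises too).
def Pre_get_rest (player : Int) (stack : List (Int × Int)) (discarded : List (Int × Int)) (decks : List (List (Int × Int))) : Prop :=
  ∀ c ∈ pvSeen player stack discarded decks,
    (pvSeen player stack discarded decks).count c ≤ pvUniverse.count c

instance (player : Int) (stack : List (Int × Int)) (discarded : List (Int × Int)) (decks : List (List (Int × Int))) : Decidable (Pre_get_rest player stack discarded decks) := by unfold Pre_get_rest; infer_instance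

def pvWitness_get_rest : Int × (List (Int × Int)) × (List (Int × Int)) × (List (List (Int × Int))) :=
  (0, [(0, 1)], [(2, 5)], [[(1, 1), (-1, -1)], [(0, 1), (3, 4)]])

def Spec_get_rest (player : Int) (stack : List (Int × Int)) (discarded : List (Int × Int)) (decks : List (List (Int × Int))) (out : List (Int × Int)) : Prop := out = get_rest_alt player stack discarded decks
instance (player : Int) (stack : List (Int × Int)) (discarded : List (Int × Int)) (decks : List (List (Int × Int))) (out : List (Int × Int)) : Decidable (Spec_get_rest player stack discarded decks out) := by unfold Spec_get_rest; infer_instance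

-- ===== CLAIM (what is proved, stated in full; the proofs are below) =====
def Claim_equal_get_rest : Prop := ∀ (player : Int) (stack : List (Int × Int)) (discarded : List (Int × Int)) (decks : List (List (Int × Int))), Dom_get_rest player stack discarded decks → Pre_get_rest player stack discarded decks → Spec_get_rest player stack discarded decks (get_rest player stack discarded decks)

-- ===== LEMMAS AND PROOFS =====

-- the common intermediate value: walk the universe, dropping the first
-- `S.count x` occurrences of each seen card x
def rcount : List (Int × Int) → List (Int × Int) → List (Int × Int)
  | [], _ => []
  | x :: L, S => if 0 < S.count x then rcount L (S.erase x) else x :: rcount L S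

lemma rcount_nil : ∀ L : List (Int × Int), rcount L [] = L := by
  intro L
  induction L with
  | nil => rfl
  | cons x L ih => simp [rcount, ih]

lemma rcount_cons (c : Int × Int) (L : List (Int × Int)) :
    ∀ S, rcount L (c :: S) = rcount (L.erase c) S := by
  induction L with
  | nil => intro S; simp [rcount]
  | cons x L ih =>
    intro S
    by_cases hx : x = c
    · subst hx
      simp [rcount, List.count_cons_self, List.erase_cons_head]
    · have h1 : (x :: L).erase c = x :: L.erase c :=
        List.erase_cons_tail (by simpa using hx)
      have h2 : (c :: S).erase x = c :: S.erase x :=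
        List.erase_cons_tail (by simpa using Ne.symm hx)
      have h3 : List.count x (c :: S) = List.count x S :=
        List.count_cons_of_ne (Ne.symm hx)
      rw [h1]
      simp only [rcount]
      rw [h3, h2]
      split_ifs with hcnt
      · exact ih _
      · rw [ih]

lemma afold (S : List (Int × Int)) :
    ∀ L : List (Int × Int), (∀ c, S.count c ≤ L.count c) →
    S.foldl (fun o c => o.bind (fun r => PySem.List.remove? r c)) (some L) = some (rcount L S) := by
  induction S with
  | nil => intro L _; simp [rcount_nil]
  | cons c S ih =>
    intro L h
    have hc : c ∈ L := by
      have := h c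
      rw [List.count_cons_self] at this
      exact List.count_pos_iff.mp (by omega)
    simp only [List.foldl_cons]
    rw [show ((some L).bind fun r => PySem.List.remove? r c) = PySem.List.remove? L c from rfl,
      PySem.List.remove?_eq_some_erase L c hc, ih (L.erase c) ?_, rcount_cons]
    intro x
    by_cases hx : x = c
    · subst hx
      have := h x
      rw [List.count_cons_self] at this
      rw [List.count_erase_self]
      omega
    · rw [List.count_erase_of_ne hx]
      have := h x
      rwa [List.count_cons_of_ne (Ne.symm hx)] at this

lemma bpass (L : List (Int × Int)) :
    ∀ (d : PySem.Dict (Int × Int) Int) (S acc : List (Int × Int)),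
    (∀ x, d.getD x 0 = (S.count x : Int)) →
    (L.foldl pvStep (d, acc)).2 = acc ++ rcount L S := by
  induction L with
  | nil => intro d S acc _; simp [rcount]
  | cons x L ih =>
    intro d S acc h
    by_cases hc : 0 < S.count x
    · have hd : d.getD x 0 > 0 := by rw [h x]; exact_mod_cast hc
      simp only [List.foldl_cons, pvStep, if_pos hd]
      rw [ih _ (S.erase x) acc ?_]
      · simp [rcount, hc]
      · intro y
        rw [PySem.Dict.getD_insert]
        by_cases hy : y = x
        · subst hy; rw [if_pos rfl, h y, List.count_erase_self]
          omega
        · rw [if_neg hy, h y, List.count_erase_of_ne hy]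
    · have hd : ¬ d.getD x 0 > 0 := by rw [h x]; exact_mod_cast hc
      simp only [List.foldl_cons, pvStep, if_neg hd]
      rw [ih d S (acc ++ [x]) h]
      simp [rcount, hc]

lemma bfinal (L : List (Int × Int)) :
    ∀ (d : PySem.Dict (Int × Int) Int) (S acc : List (Int × Int)),
    (∀ x, d.getD x 0 = (S.count x : Int)) →
    (∀ x, S.count x ≤ L.count x) →
    ∀ x, (L.foldl pvStep (d, acc)).1.getD x 0 ≤ 0 := by
  induction L with
  | nil =>
    intro d S acc h hsub x
    have := hsub x
    simp only [List.count_nil, Nat.le_zero] at this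
    simp only [List.foldl_nil]
    rw [h x, this]
    norm_num
  | cons c L ih =>
    intro d S acc h hsub
    by_cases hc : 0 < S.count c
    · have hd : d.getD c 0 > 0 := by rw [h c]; exact_mod_cast hc
      simp only [List.foldl_cons, pvStep, if_pos hd]
      refine ih _ (S.erase c) acc ?_ ?_
      · intro y
        rw [PySem.Dict.getD_insert]
        by_cases hy : y = c
        · subst hy; rw [if_pos rfl, h y, List.count_erase_self]; omega
        · rw [if_neg hy, h y, List.count_erase_of_ne hy]
      · intro y
        by_cases hy : y = c
        · subst hy
          have := hsub y
          rw [List.count_cons_self] at this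
          rw [List.count_erase_self]
          omega
        · rw [List.count_erase_of_ne hy]
          have := hsub y
          rwa [List.count_cons_of_ne (Ne.symm hy)] at this
    · have hd : ¬ d.getD c 0 > 0 := by rw [h c]; exact_mod_cast hc
      simp only [List.foldl_cons, pvStep, if_neg hd]
      refine ih d S (acc ++ [c]) h ?_
      intro y
      by_cases hy : y = c
      · subst hy
        have h0 : S.count y = 0 := by omega
        simp [h0]
      · have := hsub y
        rwa [List.count_cons_of_ne (Ne.symm hy)] at this

lemma foldl_flat {alpha : Type} (f : Option (List (Int × Int)) → (Int × Int) → Option (List (Int × Int)))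
    (g : alpha → List (Int × Int)) :
    ∀ (ds : List alpha) (init : Option (List (Int × Int))),
    ds.foldl (fun acc p => (g p).foldl f acc) init = (ds.flatMap g).foldl f init := by
  intro ds
  induction ds with
  | nil => intro init; simp
  | cons p ds ih => intro init; simp [List.foldl_append, ih]

-- A's interleaved remove loops equal one remove fold over pvSeen
lemma a_linear (player : Int) (stack discarded : List (Int × Int)) (decks : List (List (Int × Int))) :
    get_rest player stack discarded decks =
      ((pvSeen player stack discarded decks).foldl
        (fun o c => o.bind (fun r => PySem.List.remove? r c)) (some pvUniverse)).getD [] := by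
  unfold get_rest pvSeen
  simp only [PySem.List.foldl_ite_eq_foldl_filter]
  rw [List.foldl_append]
  have h := foldl_flat (fun o c => o.bind (fun r => PySem.List.remove? r c))
    (fun p : Int × List (Int × Int) => p.2.filter (fun card => decide (card ≠ (-1, -1))))
    ((PySem.List.enumerate decks).filter (fun p => decide (p.1 ≠ player))) (some pvUniverse)
  beta_reduce at h
  rw [h]

-- ===== VERDICT (by name: the statement is the Claim_ definition above) =====
theorem get_rest_spec : Claim_equal_get_rest := by
  intro player stack discarded decks _ hPre
  unfold Spec_get_rest
  have hsub : ∀ c, (pvSeen player stack discarded decks).count c ≤ pvUniverse.count c := by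
    intro c
    by_cases hm : c ∈ pvSeen player stack discarded decks
    · exact hPre c hm
    · simp [List.count_eq_zero_of_not_mem hm]
  have hcnt : ∀ x, ((pvSeen player stack discarded decks).foldl
      (fun d card => d.insert card (d.getD card 0 + 1)) PySem.Dict.empty).getD x 0 =
      ((pvSeen player stack discarded decks).count x : Int) := by
    intro x
    rw [PySem.Dict.getD_foldl_insert_add_one, PySem.Dict.getD_empty]
    ring
  have hA : get_rest player stack discarded decks =
      rcount pvUniverse (pvSeen player stack discarded decks) := by
    rw [a_linear, afold _ _ hsub]
    rfl
  have hB : get_rest_alt player stack discarded decks =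
      rcount pvUniverse (pvSeen player stack discarded decks) := by
    unfold get_rest_alt
    rw [if_neg, bpass pvUniverse _ _ [] hcnt, List.nil_append]
    rw [Bool.not_eq_true, List.any_eq_false]
    intro k _
    have := bfinal pvUniverse _ _ [] hcnt hsub k
    simpa using this
  rw [hA, hB]
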